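-- pv_equiv track=rewrite | github.com/eshun4/Data-Structures-and-Algorithms-in-Python-2024 | Sliding Window/max_number_of_consecutive_days.py | max_number_of_consecutive_days
-- ===== SOURCE A (Python) =====
-- def max_number_of_consecutive_days(sales, k):
--     # create left pointer
--     left = 0
--     # create a best tracker
--     best = 0
--     # create a number of boostable days count
--     boostable_days = 0
--     # iterate through the range of sales
--     for right in range(len(sales)):
--         if sales[right] < 10: #and sales[right] > 5:
--             if sales[right] < 5:
--                 boostable_days = 0
--                 left = right + 1
--         if sales[right] >= 5 and sales[right] <= 9:
--             boostable_days += 1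
--
--             while boostable_days > k:
--                 if sales[left] < 10 and sales[left] >= 5:
--                     boostable_days -= 1
--                 left += 1
--
--         curr_window = right - left + 1
--         best = max(curr_window, best)
--
--     return best
-- ===== SOURCE B (Python) =====
-- def max_number_of_consecutive_days(sales, k):
--     # Deque-of-boostable-indices sliding window: the left edge jumps straight
--     # past the oldest boostable day instead of shrinking one step at a time.
--     boost_idx = []   # indices of boostable days (5..9) inside the window
--     left = 0
--     best = 0
--     for right, v in enumerate(sales):
--         if v < 5:
--             boost_idx = []
--             left = right + 1
--         elif v <= 9:
--             boost_idx.append(right)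
--             if len(boost_idx) > k:
--                 left = boost_idx.pop(0) + 1
--         best = max(right - left + 1, best)
--     return best
-- ===== Notes on version B (the rewrite author's own statement) =====
-- stated objective: alternative
-- what changed: Replaces A's count-and-shrink while-loop (which re-scans sales[left] one step at a time) by a deque of the boostable-day indices inside the window, so the left edge jumps directly past the oldest boostable index in one step.
import Mathlib
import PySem

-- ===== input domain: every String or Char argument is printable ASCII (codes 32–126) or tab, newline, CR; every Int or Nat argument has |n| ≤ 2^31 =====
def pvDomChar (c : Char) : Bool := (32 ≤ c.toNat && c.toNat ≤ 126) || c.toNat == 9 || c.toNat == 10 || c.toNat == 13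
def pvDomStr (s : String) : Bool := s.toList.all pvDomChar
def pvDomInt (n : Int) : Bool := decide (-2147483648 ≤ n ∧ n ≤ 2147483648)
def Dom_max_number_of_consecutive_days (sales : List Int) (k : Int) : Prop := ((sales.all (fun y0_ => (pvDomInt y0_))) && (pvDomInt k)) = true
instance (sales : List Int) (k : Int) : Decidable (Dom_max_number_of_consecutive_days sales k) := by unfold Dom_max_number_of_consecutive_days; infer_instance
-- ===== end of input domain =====

-- ===== PORT A =====
-- B replaces A's one-step-at-a-time shrink loop by a deque of boostable-day indices (objective: alternative).
-- Port of A's inner `while boostable_days > k` loop; `left` starts at 0 and only increments, so it is kept as a Nat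
-- (the Int cast into pyGet? is exact); pyGet? = none models the IndexError.
def whileA (sales : List Int) (k : Int) (boostable : Int) (left : Nat) : Option (Int × Nat) :=
  if boostable > k then
    match h : PySem.List.pyGet? sales (left : Int) with
    | none => none
    | some v =>
      whileA sales k (if v < 10 ∧ v ≥ 5 then boostable - 1 else boostable) (left + 1)
  else some (boostable, left)
termination_by sales.length - left
decreasing_by
  simp only [PySem.List.pyGet?_natCast] at h
  obtain ⟨h1, -⟩ := List.getElem?_eq_some_iff.mp h
  omega

-- Port of A's for-loop over range(len(sales)); returns none where the Python raises.
def loopA (sales : List Int) (k : Int) (r left : Nat) (best boostable : Int) : Option Int :=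
  if hr : r < sales.length then
    let v := sales[r]
    let s1 : Int × Nat :=
      if v < 10 then (if v < 5 then ((0 : Int), r + 1) else (boostable, left)) else (boostable, left)
    if 5 ≤ v ∧ v ≤ 9 then
      match whileA sales k (s1.1 + 1) s1.2 with
      | none => none
      | some (b2, l2) => loopA sales k (r + 1) l2 (max ((r : Int) - (l2 : Int) + 1) best) b2
    else
      loopA sales k (r + 1) s1.2 (max ((r : Int) - (s1.2 : Int) + 1) best) s1.1
  else some best
termination_by sales.length - r

-- Under Pre_ the loop never returns none, so the .getD 0 default is never taken.
def max_number_of_consecutive_days (sales : List Int) (k : Int) : Int :=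
  (loopA sales k 0 0 0 0).getD 0

-- ===== PORT B =====
-- Port of B's `for right, v in enumerate(sales)` loop: q holds the indices of boostable days in the window.
def loopB (k : Int) (xs : List Int) (q : List Nat) (r left : Nat) (best : Int) : Int :=
  match xs with
  | [] => best
  | v :: rest =>
    let s : List Nat × Nat :=
      if v < 5 then ([], r + 1)
      else if v ≤ 9 then
        let q2 := q ++ [r]
        if (q2.length : Int) > k then (q2.tail, q2.headD 0 + 1) else (q2, left)
      else (q, left)
    loopB k rest s.1 (r + 1) s.2 (max ((r : Int) - (s.2 : Int) + 1) best)

def max_number_of_consecutive_days_alt (sales : List Int) (k : Int) : Int :=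
  loopB k sales [] 0 0 0

-- ===== PRECONDITION & SPEC =====
-- A raises IndexError exactly when k < 0 and sales contains a boostable value (5..9): its shrink loop then has to
-- consume one more boostable index than the list holds. Pre_ excludes exactly those raising inputs and nothing else.
def Pre_max_number_of_consecutive_days (sales : List Int) (k : Int) : Prop :=
  0 ≤ k ∨ ∀ v ∈ sales, ¬ (5 ≤ v ∧ v ≤ 9)
instance (sales : List Int) (k : Int) : Decidable (Pre_max_number_of_consecutive_days sales k) := by
  unfold Pre_max_number_of_consecutive_days; infer_instance

def pvWitness_max_number_of_consecutive_days : List Int × Int := ([6, 12, 3, 7, 7], 1)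

def Spec_max_number_of_consecutive_days (sales : List Int) (k : Int) (out : Int) : Prop := out = max_number_of_consecutive_days_alt sales k
instance (sales : List Int) (k : Int) (out : Int) : Decidable (Spec_max_number_of_consecutive_days sales k out) := by unfold Spec_max_number_of_consecutive_days; infer_instance

-- ===== CLAIM (what is proved, stated in full; the proofs are below) =====
def Claim_equal_max_number_of_consecutive_days : Prop := ∀ (sales : List Int) (k : Int), Dom_max_number_of_consecutive_days sales k → Pre_max_number_of_consecutive_days sales k → Spec_max_number_of_consecutive_days sales k (max_number_of_consecutive_days sales k)


-- ===== LEMMAS AND PROOFS =====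

-- i is a boostable index of sales
def isB (sales : List Int) (i : Nat) : Bool :=
  decide (5 ≤ sales.getD i 0) && decide (sales.getD i 0 ≤ 9)

-- the boostable indices in [left, r), in increasing order: exactly B's deque
def bIdx (sales : List Int) (left r : Nat) : List Nat :=
  (List.range r).filter (fun i => decide (left ≤ i) && isB sales i)

lemma mem_bIdx {sales : List Int} {left r i : Nat} :
    i ∈ bIdx sales left r ↔ i < r ∧ left ≤ i ∧ isB sales i = true := by
  simp [bIdx, List.mem_filter, List.mem_range]

lemma pairwise_bIdx (sales : List Int) (left r : Nat) :
    (bIdx sales left r).Pairwise (· < ·) :=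
  (List.pairwise_lt_range).filter _

lemma bIdx_ge {sales : List Int} {left r : Nat} (h : r ≤ left) : bIdx sales left r = [] := by
  refine List.filter_eq_nil_iff.mpr ?_
  intro i hi
  simp only [List.mem_range] at hi
  simp [show ¬ left ≤ i by omega]

lemma bIdx_succ_pos {sales : List Int} {left r : Nat} (h1 : left ≤ r) (h2 : isB sales r = true) :
    bIdx sales left (r + 1) = bIdx sales left r ++ [r] := by
  simp [bIdx, List.range_succ, List.filter_append, h1, h2]

lemma bIdx_succ_neg {sales : List Int} {left r : Nat} (h2 : isB sales r = false) :
    bIdx sales left (r + 1) = bIdx sales left r := by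
  simp [bIdx, List.range_succ, List.filter_append, h2]

lemma bIdx_filter {sales : List Int} {left left' r : Nat} (h : left ≤ left') :
    bIdx sales left' r = (bIdx sales left r).filter (fun i => decide (left' ≤ i)) := by
  simp only [bIdx, List.filter_filter]
  refine (List.filter_congr ?_).symm
  intro i _
  by_cases hi : left' ≤ i
  · simp [hi, show left ≤ i by omega]
  · simp [hi]

lemma bIdx_tail {sales : List Int} {left r h0 : Nat} {t : List Nat}
    (hc : bIdx sales left r = h0 :: t) : t = bIdx sales (h0 + 1) r := by
  have hmem : h0 ∈ bIdx sales left r := by rw [hc]; exact List.mem_cons_self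
  have hl : left ≤ h0 := (mem_bIdx.mp hmem).2.1
  have hp : (h0 :: t).Pairwise (· < ·) := hc ▸ pairwise_bIdx sales left r
  rw [bIdx_filter (show left ≤ h0 + 1 by omega), hc]
  simp only [List.filter_cons]
  rw [if_neg (by simp)]
  refine (List.filter_eq_self.mpr ?_).symm
  intro x hx
  have := (List.pairwise_cons.mp hp).1 x hx
  simp; omega

lemma bIdx_no_boost_before {sales : List Int} {left r h0 : Nat} {t : List Nat}
    (hc : bIdx sales left r = h0 :: t) :
    ∀ i, left ≤ i → i < h0 → isB sales i = false := by
  intro i h1 h2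
  by_contra hb
  have hb' : isB sales i = true := by
    cases hib : isB sales i with
    | false => exact absurd hib hb
    | true => rfl
  have hr : h0 < r := (mem_bIdx.mp (by rw [hc]; exact List.mem_cons_self)).1
  have hi : i ∈ bIdx sales left r := mem_bIdx.mpr ⟨by omega, h1, hb'⟩
  rw [hc] at hi
  have hp : (h0 :: t).Pairwise (· < ·) := hc ▸ pairwise_bIdx sales left r
  rcases List.mem_cons.mp hi with h | h
  · omega
  · have := (List.pairwise_cons.mp hp).1 i h; omega

lemma isB_true_iff {sales : List Int} {i : Nat} (hi : i < sales.length) :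
    isB sales i = true ↔ 5 ≤ sales[i] ∧ sales[i] ≤ 9 := by
  simp [isB, List.getD_eq_getElem?_getD, List.getElem?_eq_getElem hi]

lemma whileA_neg {sales : List Int} {k boostable : Int} {left : Nat}
    (h : ¬ boostable > k) : whileA sales k boostable left = some (boostable, left) := by
  rw [whileA.eq_def, if_neg h]

lemma whileA_pos {sales : List Int} {k boostable : Int} {left : Nat} {v : Int}
    (hb : boostable > k) (hget : PySem.List.pyGet? sales (left : Int) = some v) :
    whileA sales k boostable left
      = whileA sales k (if v < 10 ∧ v ≥ 5 then boostable - 1 else boostable) (left + 1) := by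
  rw [whileA.eq_def, if_pos hb]
  split
  · next heq => rw [hget] at heq; simp at heq
  · next v' heq => rw [hget] at heq; cases heq; rfl

lemma whileA_spec (sales : List Int) (k : Int) :
    ∀ (d left h0 : Nat), h0 < sales.length → left ≤ h0 → h0 - left = d →
      isB sales h0 = true → (∀ i, left ≤ i → i < h0 → isB sales i = false) →
      whileA sales k (k + 1) left = some (k, h0 + 1) := by
  intro d
  induction d with
  | zero =>
    intro left h0 hlen hle hd hB _
    have : left = h0 := by omega
    subst this
    have hget : PySem.List.pyGet? sales (left : Int) = some sales[left] := by
      simp [PySem.List.pyGet?_natCast, List.getElem?_eq_getElem hlen]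
    have hv := (isB_true_iff hlen).mp hB
    rw [whileA_pos (by omega) hget, if_pos (by constructor <;> omega),
      whileA_neg (by omega)]
    norm_num
  | succ d ih =>
    intro left h0 hlen hle hd hB hno
    have hlt : left < h0 := by omega
    have hllen : left < sales.length := by omega
    have hget : PySem.List.pyGet? sales (left : Int) = some sales[left] := by
      simp [PySem.List.pyGet?_natCast, List.getElem?_eq_getElem hllen]
    have hBl : isB sales left = false := hno left (le_refl _) hlt
    have hvl : ¬ (5 ≤ sales[left] ∧ sales[left] ≤ 9) := by
      intro hc
      rw [(isB_true_iff hllen).mpr hc] at hBl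
      exact Bool.true_eq_false.mp hBl
    rw [whileA_pos (by omega) hget, if_neg (by intro hc; exact hvl ⟨hc.2, by omega⟩)]
    exact ih (left + 1) h0 hlen (by omega) (by omega) hB
      (fun i hi1 hi2 => hno i (by omega) hi2)

lemma loop_eq (sales : List Int) (k : Int)
    (hp : 0 ≤ k ∨ ∀ i, i < sales.length → isB sales i = false) :
    ∀ (rest : List Int) (r left : Nat) (best : Int) (q : List Nat),
      sales.drop r = rest → left ≤ r → q = bIdx sales left r →
      (0 ≤ k → (q.length : Int) ≤ k) →
      loopA sales k r left best (q.length : Int) = some (loopB k rest q r left best) := by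
  intro rest
  induction rest with
  | nil =>
    intro r left best q hdrop _ _ _
    have hr : sales.length ≤ r := by
      have := List.drop_eq_nil_iff.mp hdrop; omega
    rw [loopA, dif_neg (by omega)]
    rfl
  | cons v rest ih =>
    intro r left best q hdrop hlr hq hqk
    have hr : r < sales.length := by
      by_contra hc
      rw [List.drop_eq_nil_iff.mpr (by omega)] at hdrop
      exact (List.cons_ne_nil v rest) hdrop.symm
    have hv : sales[r] = v := by
      have h0 : (sales.drop r)[0]? = some v := by rw [hdrop]; rfl
      rw [List.getElem?_drop] at h0
      simpa [List.getElem?_eq_getElem hr] using h0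
    have hdrop' : sales.drop (r + 1) = rest := by
      have h1 : List.drop 1 (sales.drop r) = rest := by rw [hdrop]; rfl
      rw [List.drop_drop] at h1
      simpa [Nat.add_comm] using h1
    rw [loopA, dif_pos hr]
    simp only [hv, loopB]
    by_cases hv5 : v < 5
    · -- reset day
      have hB : isB sales r = false := by
        cases hib : isB sales r with
        | false => rfl
        | true => exfalso; have h2 := (isB_true_iff hr).mp hib; rw [hv] at h2; omega
      rw [if_pos (show v < 10 by omega), if_pos hv5, if_neg (show ¬ (5 ≤ v ∧ v ≤ 9) by omega)]
      rw [if_pos hv5]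
      have := ih (r + 1) (r + 1) (max ((r : Int) - ((r + 1 : Nat) : Int) + 1) best) []
        hdrop' (le_refl _) (bIdx_ge (le_refl _)).symm (by simp)
      simpa using this
    · by_cases hv9 : v ≤ 9
      · -- boostable day
        have hk : 0 ≤ k := by
          rcases hp with h | h
          · exact h
          · exfalso
            have := h r hr
            rw [(isB_true_iff hr).mpr (by rw [hv]; exact ⟨by omega, hv9⟩)] at this
            exact Bool.true_eq_false.mp this
        have hB : isB sales r = true := (isB_true_iff hr).mpr (by rw [hv]; exact ⟨by omega, hv9⟩)
        have hq2 : q ++ [r] = bIdx sales left (r + 1) := by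
          rw [hq, ← bIdx_succ_pos hlr hB]
        rw [if_pos (show v < 10 by omega), if_neg hv5,
          if_pos (show 5 ≤ v ∧ v ≤ 9 from ⟨by omega, hv9⟩), if_neg hv5, if_pos hv9]
        by_cases hgt : ((q.length : Int) + 1 > k)
        · -- window over budget: pop the oldest boostable index
          have hqlk : (q.length : Int) = k := le_antisymm (hqk hk) (by omega)
          rcases hc : q ++ [r] with _ | ⟨h0, t⟩
          · exact absurd hc (by simp)
          have hcb : bIdx sales left (r + 1) = h0 :: t := hq2 ▸ hc
          have hmem := mem_bIdx.mp (by rw [hcb]; exact List.mem_cons_self)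
          have hh0len : h0 < sales.length := by omega
          have hwhile : whileA sales k ((q.length : Int) + 1) left = some (k, h0 + 1) := by
            rw [hqlk]
            exact whileA_spec sales k (h0 - left) left h0 hh0len hmem.2.1 rfl hmem.2.2
              (bIdx_no_boost_before hcb)
          rw [hwhile]
          have hlen2 : (((h0 :: t).length : Nat) : Int) > k := by rw [← hc]; simp; omega
          rw [if_pos hlen2]
          have ht : t = bIdx sales (h0 + 1) (r + 1) := bIdx_tail hcb
          have htlen : (t.length : Int) = k := by
            have : (q ++ [r]).length = q.length + 1 := by simp
            rw [hc] at this
            simp at this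
            omega
          have := ih (r + 1) (h0 + 1) (max ((r : Int) - ((h0 + 1 : Nat) : Int) + 1) best) t
            hdrop' (by omega) ht (fun _ => le_of_eq htlen)
          rw [htlen] at this
          simpa using this
        · -- window within budget: keep the new index
          have hwhile : whileA sales k ((q.length : Int) + 1) left
              = some ((q.length : Int) + 1, left) := whileA_neg (by omega)
          rw [hwhile]
          have hlen2 : ¬ (((q ++ [r]).length : Int) > k) := by simp; omega
          rw [if_neg hlen2]
          have := ih (r + 1) left (max ((r : Int) - (left : Int) + 1) best) (q ++ [r])
            hdrop' (by omega) hq2 (by intro _; simp; omega)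
          have hlen3 : ((q ++ [r]).length : Int) = (q.length : Int) + 1 := by simp
          rw [hlen3] at this
          simpa using this
      · -- v ≥ 10: nothing changes
        have hB : isB sales r = false := by
          cases hib : isB sales r with
          | false => rfl
          | true => exfalso; have h2 := (isB_true_iff hr).mp hib; rw [hv] at h2; omega
        rw [if_neg (show ¬ v < 10 by omega), if_neg hv5,
          if_neg (show ¬ (5 ≤ v ∧ v ≤ 9) by intro hc; exact hv9 hc.2), if_neg hv9]
        have := ih (r + 1) left (max ((r : Int) - (left : Int) + 1) best) q
          hdrop' (by omega) (by rw [hq, ← bIdx_succ_neg hB]) hqk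
        simpa using this

-- ===== VERDICT (by name: the statement is the Claim_ definition above) =====
theorem max_number_of_consecutive_days_spec : Claim_equal_max_number_of_consecutive_days := by
  intro sales k _ hpre
  unfold Spec_max_number_of_consecutive_days max_number_of_consecutive_days
    max_number_of_consecutive_days_alt
  have hp : 0 ≤ k ∨ ∀ i, i < sales.length → isB sales i = false := by
    rcases hpre with h | h
    · exact Or.inl h
    · refine Or.inr fun i hi => ?_
      cases hib : isB sales i with
      | false => rfl
      | true =>
        have := (isB_true_iff hi).mp hib
        exact absurd this (h sales[i] (List.getElem_mem hi))
  have := loop_eq sales k hp sales 0 0 0 [] (by simp) (le_refl 0)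
    (by rw [bIdx_ge (le_refl 0)]) (by simp)
  simp only [List.length_nil, Nat.cast_zero] at this
  rw [this]
  rfl
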